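-- pv_equiv track=rewrite | github.com/martimgil/FP | aula04/Resoluçoes/Codecheck_1.py | nextLeapYear
-- ===== SOURCE A (Python) =====
-- def isLeapYear(year):
--     return year%4 == 0 and year%100 != 0 or year%400 == 0
--
-- def nextLeapYear(year):
--     """Return the first leap year after the given year."""
--     # Which kind of loop is more appropriate?
--     year +=1
--     while True:
--         result = isLeapYear(year)
--         if result == True:
--             break
--         else:
--             year +=1
--     return year
-- ===== SOURCE B (Python) =====
-- def nextLeapYear(year):
--     """Return the first leap year after the given year."""
--     m = (year // 4 + 1) * 4  # smallest multiple of 4 strictly after year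
--     if m % 100 == 0 and m % 400 != 0:
--         m += 4  # skip the non-leap century; the next multiple of 4 is leap
--     return m
-- ===== Notes on version B (the rewrite author's own statement) =====
-- stated objective: simpler
-- what changed: Replaces the year-by-year scanning loop with a closed-form computation: the next multiple of four via floor division, plus one conditional skip of a non-leap century.
import Mathlib
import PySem

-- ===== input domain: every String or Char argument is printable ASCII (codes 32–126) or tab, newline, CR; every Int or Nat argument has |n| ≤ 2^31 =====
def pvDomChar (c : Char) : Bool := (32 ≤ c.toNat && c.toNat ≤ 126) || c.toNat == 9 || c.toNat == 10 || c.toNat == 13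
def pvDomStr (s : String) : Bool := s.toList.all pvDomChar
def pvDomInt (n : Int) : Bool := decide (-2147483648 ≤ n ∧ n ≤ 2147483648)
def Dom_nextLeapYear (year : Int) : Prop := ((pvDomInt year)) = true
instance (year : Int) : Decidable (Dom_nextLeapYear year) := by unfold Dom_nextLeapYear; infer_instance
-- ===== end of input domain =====

-- B replaces A's year-by-year scan with a closed-form computation (next multiple of four, plus one
-- conditional century skip); objective: simpler. Equal return value proved for all |year| ≤ 2^31.

-- ===== PORT A =====
def isLeapYear (year : Int) : Bool :=
  (PySem.Int.mod year 4 == 0 && PySem.Int.mod year 100 != 0) || PySem.Int.mod year 400 == 0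

-- the 'while True' loop; the Nat fuel only makes it total (8 always suffices, see nlTarget_bounds)
def nextLeapLoop : Nat → Int → Int
  | 0, year => year
  | fuel + 1, year =>
    let result := isLeapYear year
    if result = true then year
    else nextLeapLoop fuel (year + 1)

def nextLeapYear (year : Int) : Int :=
  nextLeapLoop 8 (year + 1)

-- ===== PORT B =====
def nextLeapYear_alt (year : Int) : Int :=
  let m := (PySem.Int.floordiv year 4 + 1) * 4
  if PySem.Int.mod m 100 == 0 && PySem.Int.mod m 400 != 0 then m + 4 else m

-- ===== PRECONDITION & SPEC =====
def Spec_nextLeapYear (year : Int) (out : Int) : Prop := out = nextLeapYear_alt year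
instance (year : Int) (out : Int) : Decidable (Spec_nextLeapYear year out) := by unfold Spec_nextLeapYear; infer_instance

-- ===== CLAIM (what is proved, stated in full; the proofs are below) =====
def Claim_equal_nextLeapYear : Prop := ∀ (year : Int), Dom_nextLeapYear year → Spec_nextLeapYear year (nextLeapYear year)

-- ===== LEMMAS AND PROOFS =====
-- the first leap year ≥ y; used only in the proofs (fuel-sufficiency bound and loop characterisation)
def nlTarget (y : Int) : Int :=
  if (y + (-y) % 4) % 100 = 0 ∧ (y + (-y) % 4) % 400 ≠ 0 then (y + (-y) % 4) + 4
  else y + (-y) % 4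

-- 0 ≤ (-y)%4 < 4 gives y ≤ nlTarget y ≤ y + 7: a fuel of 8 always reaches the loop's exit
theorem nlTarget_bounds (y : Int) : y ≤ nlTarget y ∧ nlTarget y ≤ y + 7 := by
  unfold nlTarget; split <;> omega

theorem isLeap_emod (y : Int) :
    isLeapYear y = ((y % 4 == 0 && !(y % 100 == 0)) || y % 400 == 0) := by
  simp [isLeapYear, bne]

theorem nlTarget_step (y : Int) (h : isLeapYear y = false) :
    nlTarget (y + 1) = nlTarget y ∧ y < nlTarget y := by
  rw [isLeap_emod] at h
  simp only [Bool.or_eq_false_iff, Bool.and_eq_false_iff, beq_eq_false_iff_ne,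
    Bool.not_eq_false', beq_iff_eq] at h
  unfold nlTarget
  split <;> split <;> omega

theorem nlTarget_eq_self (y : Int) (h : isLeapYear y = true) : nlTarget y = y := by
  rw [isLeap_emod] at h
  simp only [Bool.or_eq_true, Bool.and_eq_true, beq_iff_eq, Bool.not_eq_true', beq_eq_false_iff_ne] at h
  unfold nlTarget
  split <;> omega

theorem loop_eq_target (fuel : Nat) (y : Int) (hfuel : nlTarget y ≤ y + fuel) :
    nextLeapLoop fuel y = nlTarget y := by
  induction fuel generalizing y with
  | zero =>
    have := (nlTarget_bounds y).1
    simp only [nextLeapLoop]; omega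
  | succ fuel ih =>
    simp only [nextLeapLoop]
    by_cases h : isLeapYear y = true
    · simp [h, nlTarget_eq_self y h]
    · have hs := nlTarget_step y (by simpa using h)
      rw [ih (y + 1) (by omega), hs.1]
      simp [h]

theorem alt_eq_target (y : Int) : nextLeapYear_alt y = nlTarget (y + 1) := by
  have hm : (PySem.Int.floordiv y 4 + 1) * 4 = (y + 1) + (-(y + 1)) % 4 := by
    rw [PySem.Int.floordiv_eq_ediv_of_pos (by omega : (0:Int) < 4)]; omega
  simp only [nextLeapYear_alt, nlTarget, hm,
    PySem.Int.mod_eq_emod_of_pos (b := (100:Int)) (by omega : (0:Int) < 100),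
    PySem.Int.mod_eq_emod_of_pos (b := (400:Int)) (by omega : (0:Int) < 400),
    Bool.and_eq_true, beq_iff_eq, bne_iff_ne]

-- ===== VERDICT (by name: the statement is the Claim_ definition above) =====
theorem nextLeapYear_spec : Claim_equal_nextLeapYear := by
  intro year _
  unfold Spec_nextLeapYear nextLeapYear
  rw [loop_eq_target 8 (year + 1) (by have := (nlTarget_bounds (year + 1)).2; omega),
    alt_eq_target]
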